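-- pv_equiv track=rewrite | github.com/big-lip-bob/UnfunPyMooc | 5/4/intersection.py | anchorSubSeq
-- ===== SOURCE A (Python) =====
-- def anchorSubSeq(a, b):
--     # assert len(a) == len(b)
--     mptr = 0
--     msiz = 0
--
--     optr = 0
--     size = 0
--
--     while optr + size < len(a):
--         while a[optr: optr + size] == b[optr: optr + size]:
--             size += 1
--             if len(a) < optr + size: break
--
--         size -= 1
--
--         if msiz < size:
--             msiz = size
--             mptr = optr
--
--         optr += size + 1
--         size = 1
--
--     return a[mptr: mptr + msiz]
-- ===== SOURCE B (Python) =====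
-- def anchorSubSeq(a, b):
--     best = 0
--     ptr = 0
--     cur = 0
--     i = 0
--     for x, y in zip(a, b):
--         if x == y:
--             cur += 1
--             if cur > best:
--                 best = cur
--                 ptr = i + 1 - cur
--         else:
--             cur = 0
--         i += 1
--     return a[ptr:ptr + best]
-- ===== Notes on version B (the rewrite author's own statement) =====
-- stated objective: faster
-- what changed: Replaced the nested loop that re-compares a growing slice pair at every extension step by a single linear pass over zip(a,b) that counts the current aligned-match run and keeps the leftmost maximum.
-- intended difference: When len(b) >= len(a) >= 2, a[-1] == b[len(a)-1] and all earlier aligned positions mismatch, A returns '' because its outer loop never starts a run at the last index, while B returns that single matching last character, which is the longest aligned matching run. — e.g. on anchorSubSeq("xy", "zy"): A returns "", B returns "y"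
import Mathlib
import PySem

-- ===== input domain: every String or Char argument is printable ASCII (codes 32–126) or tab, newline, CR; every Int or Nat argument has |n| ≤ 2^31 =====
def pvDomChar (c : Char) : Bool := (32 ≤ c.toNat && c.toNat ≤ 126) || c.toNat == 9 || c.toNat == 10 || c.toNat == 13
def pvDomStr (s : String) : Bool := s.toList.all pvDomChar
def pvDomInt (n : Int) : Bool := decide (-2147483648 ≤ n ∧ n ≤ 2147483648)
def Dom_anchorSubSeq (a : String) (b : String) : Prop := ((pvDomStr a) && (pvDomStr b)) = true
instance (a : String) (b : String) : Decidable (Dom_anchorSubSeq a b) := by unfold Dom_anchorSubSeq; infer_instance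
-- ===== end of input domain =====

-- B changes A's algorithm: one linear pass counting the aligned-match run instead of re-comparing
-- growing slices; B also returns the intended single-character run at the last index that A misses (see D_).

-- ===== PORT A =====
-- A's counters mptr/msiz/optr/size stay ≥ 0 throughout (size is only decremented after the inner
-- loop has run at least once from 0, or returns ≥ 1), so they are carried as Nat; slices are taken
-- with PySem.List.slice on Int casts, exactly as Python slices them.

-- inner 'while a[optr:optr+size] == b[optr:optr+size]:' loop; returns the final value of size
def pvInnerA (A B : List Char) (optr size : Nat) : Nat :=
  if PySem.List.slice A (some (optr : Int)) (some ((optr : Int) + (size : Int)))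
      = PySem.List.slice B (some (optr : Int)) (some ((optr : Int) + (size : Int))) then
    -- size += 1; if len(a) < optr + size: break
    if A.length < optr + (size + 1) then size + 1
    else pvInnerA A B optr (size + 1)
  else size
termination_by (A.length + 1) - (optr + size)
decreasing_by omega

-- outer 'while optr + size < len(a):' loop; returns a[mptr : mptr + msiz]
def pvOuterA (A B : List Char) (mptr msiz optr size : Nat) : List Char :=
  if h : optr + size < A.length then
    let size1 := pvInnerA A B optr size
    let size2 := size1 - 1                       -- size -= 1
    let mp := if msiz < size2 then (optr, size2) else (mptr, msiz)
    pvOuterA A B mp.1 mp.2 (optr + size2 + 1) 1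
  else
    PySem.List.slice A (some (mptr : Int)) (some ((mptr : Int) + (msiz : Int)))
termination_by A.length - optr
decreasing_by omega

def anchorSubSeq (a : String) (b : String) : String :=
  String.ofList (pvOuterA a.toList b.toList 0 0 0 0)

-- ===== PORT B =====
-- state (best, ptr, cur, i), one step of the for-loop over zip(a, b)
def pvAltStep (st : Nat × Nat × Nat × Nat) (xy : Char × Char) : Nat × Nat × Nat × Nat :=
  if xy.1 = xy.2 then
    let cur := st.2.2.1 + 1
    if st.1 < cur then (cur, st.2.2.2 + 1 - cur, cur, st.2.2.2 + 1)
    else (st.1, st.2.1, cur, st.2.2.2 + 1)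
  else (st.1, st.2.1, 0, st.2.2.2 + 1)

def anchorSubSeq_alt (a : String) (b : String) : String :=
  let st := (a.toList.zip b.toList).foldl pvAltStep (0, 0, 0, 0)
  String.ofList (PySem.List.slice a.toList (some (st.2.1 : Int)) (some ((st.2.1 : Int) + (st.1 : Int))))

-- ===== PRECONDITION & SPEC =====
-- A's outer loop advances with size = 1 and guard 'optr + size < len(a)', so it can never START a
-- run at the last index: when every aligned position before the last mismatches and the last one
-- matches, A returns '' while B returns that single matching character — the intended longest run.
def D_anchorSubSeq (a : String) (b : String) : Prop :=
  2 ≤ a.toList.length ∧ a.toList.length ≤ b.toList.length ∧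
  a.toList.getD (a.toList.length - 1) 'a' = b.toList.getD (a.toList.length - 1) 'a' ∧
  ∀ i, i < a.toList.length - 1 → a.toList.getD i 'a' ≠ b.toList.getD i 'a'
instance (a : String) (b : String) : Decidable (D_anchorSubSeq a b) := by
  unfold D_anchorSubSeq; infer_instance

def Spec_anchorSubSeq (a : String) (b : String) (out : String) : Prop :=
  ¬ D_anchorSubSeq a b → out = anchorSubSeq_alt a b
instance (a : String) (b : String) (out : String) : Decidable (Spec_anchorSubSeq a b out) := by
  unfold Spec_anchorSubSeq; infer_instance

def pvDiffWitness_anchorSubSeq : String × String := ("xy", "zy")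
def pvDiffWitnessOut_anchorSubSeq : String × String := ("", "y")

-- ===== CLAIM (what is proved, stated in full; the proofs are below) =====
def Claim_unchanged_anchorSubSeq : Prop := ∀ (a : String) (b : String), Dom_anchorSubSeq a b → Spec_anchorSubSeq a b (anchorSubSeq a b)
def Claim_changed_anchorSubSeq : Prop := Dom_anchorSubSeq (pvDiffWitness_anchorSubSeq.1) (pvDiffWitness_anchorSubSeq.2) ∧ D_anchorSubSeq (pvDiffWitness_anchorSubSeq.1) (pvDiffWitness_anchorSubSeq.2) ∧ anchorSubSeq (pvDiffWitness_anchorSubSeq.1) (pvDiffWitness_anchorSubSeq.2) = pvDiffWitnessOut_anchorSubSeq.1 ∧ anchorSubSeq_alt (pvDiffWitness_anchorSubSeq.1) (pvDiffWitness_anchorSubSeq.2) = pvDiffWitnessOut_anchorSubSeq.2 ∧ pvDiffWitnessOut_anchorSubSeq.1 ≠ pvDiffWitnessOut_anchorSubSeq.2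
def Claim_exact_anchorSubSeq : Prop := ∀ (a : String) (b : String), Dom_anchorSubSeq a b → D_anchorSubSeq a b → anchorSubSeq a b ≠ anchorSubSeq_alt a b


-- ===== LEMMAS AND PROOFS =====

-- length of the aligned matching run starting at position p
def pvRun (A B : List Char) (p : Nat) : Nat :=
  (((A.zip B).drop p).takeWhile (fun c => c.1 == c.2)).length

-- B's loop as an explicit recursion on the zip list
def pvBRun (l : List (Char × Char)) (best ptr cur i : Nat) : Nat × Nat :=
  match l with
  | [] => (best, ptr)
  | xy :: rest =>
    if xy.1 = xy.2 then
      if best < cur + 1 then pvBRun rest (cur + 1) (i + 1 - (cur + 1)) (cur + 1) (i + 1)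
      else pvBRun rest best ptr (cur + 1) (i + 1)
    else pvBRun rest best ptr 0 (i + 1)

lemma pvFoldl_eq_bRun (l : List (Char × Char)) : ∀ best ptr cur i,
    ((l.foldl pvAltStep (best, ptr, cur, i)).1, (l.foldl pvAltStep (best, ptr, cur, i)).2.1)
      = pvBRun l best ptr cur i := by
  induction l with
  | nil => intro best ptr cur i; rfl
  | cons xy rest ih =>
    intro best ptr cur i
    rw [List.foldl_cons, pvBRun]
    by_cases h : xy.1 = xy.2
    · by_cases h2 : best < cur + 1
      · simp only [pvAltStep, h, h2, if_true, if_pos, ih]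
      · simp only [pvAltStep, h, h2, if_true, if_neg, if_pos, ih]; simp [h2, ih]
    · simp [pvAltStep, h, ih]

lemma pvZipDrop (A B : List Char) (p : Nat) :
    (A.drop p).zip (B.drop p) = (A.zip B).drop p := by
  simp [List.zip, List.drop_zipWith]

lemma pvTake_eq_iff (s : Nat) : ∀ (X Y : List Char), s ≤ X.length →
    (X.take s = Y.take s ↔ s ≤ ((X.zip Y).takeWhile (fun c => c.1 == c.2)).length) := by
  induction s with
  | zero => intro X Y _; simp
  | succ s ih =>
    intro X Y h
    match X, Y with
    | [], _ => simp at h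
    | x :: X', [] => simp
    | x :: X', y :: Y' =>
      by_cases hxy : x = y
      · simp only [List.take_succ_cons, List.zip_cons_cons, List.takeWhile_cons, hxy]
        simp only [List.length_cons] at h ⊢
        simp [ih X' Y' (by omega), hxy, Nat.succ_le_succ_iff]
      · simp [List.take_succ_cons, hxy]

lemma pvRun_le (A B : List Char) (p : Nat) : pvRun A B p ≤ (A.zip B).length - p := by
  unfold pvRun
  calc (((A.zip B).drop p).takeWhile (fun c => c.1 == c.2)).length
      ≤ ((A.zip B).drop p).length := (List.takeWhile_sublist _).length_le
    _ = (A.zip B).length - p := by simp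

lemma pvInner_spec (A B : List Char) (p : Nat) (hp : p < A.length) :
    ∀ s, s ≤ pvRun A B p + 1 → p + s ≤ A.length → pvInnerA A B p s = pvRun A B p + 1 := by
  have hrle : pvRun A B p ≤ A.length - p := by
    have h1 := pvRun_le A B p
    have h2 : (A.zip B).length ≤ A.length := by simp [Nat.min_le_left]
    omega
  have hiff : ∀ s, p + s ≤ A.length →
      ((PySem.List.slice A (some (p : Int)) (some ((p : Int) + (s : Int)))
        = PySem.List.slice B (some (p : Int)) (some ((p : Int) + (s : Int))))
       ↔ s ≤ pvRun A B p) := by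
    intro s hs
    rw [PySem.List.slice_natCast_add, PySem.List.slice_natCast_add]
    have := pvTake_eq_iff s (A.drop p) (B.drop p) (by simp; omega)
    rwa [pvZipDrop] at this
  suffices h : ∀ t s, pvRun A B p + 1 - s ≤ t → s ≤ pvRun A B p + 1 → p + s ≤ A.length →
      pvInnerA A B p s = pvRun A B p + 1 by
    intro s hs hpn; exact h (pvRun A B p + 1) s (by omega) hs hpn
  intro t
  induction t with
  | zero =>
    intro s h1 h2 h3
    have hs : s = pvRun A B p + 1 := by omega
    rw [pvInnerA, if_neg]
    · exact hs
    · rw [hiff s h3]; omega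
  | succ t ih =>
    intro s h1 h2 h3
    by_cases hcase : s = pvRun A B p + 1
    · rw [pvInnerA, if_neg]
      · exact hcase
      · rw [hiff s h3]; omega
    · have hsr : s ≤ pvRun A B p := by omega
      rw [pvInnerA, if_pos (by rw [hiff s h3]; exact hsr)]
      by_cases hbr : A.length < p + (s + 1)
      · rw [if_pos hbr]; omega
      · rw [if_neg hbr]
        exact ih (s + 1) (by omega) (by omega) (by omega)

lemma pvBRun_congr (l : List (Char × Char)) (a a' b b' c c' d d' : Nat)
    (h1 : a = a') (h2 : b = b') (h3 : c = c') (h4 : d = d') :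
    pvBRun l a b c d = pvBRun l a' b' c' d' := by
  subst h1; subst h2; subst h3; subst h4; rfl

lemma pvBRun_run : ∀ (t rest : List (Char × Char)) (best ptr cur i : Nat),
    (∀ xy ∈ t, xy.1 = xy.2) → cur ≤ best → cur ≤ i →
    pvBRun (t ++ rest) best ptr cur i =
      pvBRun rest (if best < cur + t.length then cur + t.length else best)
        (if best < cur + t.length then i - cur else ptr) (cur + t.length) (i + t.length) := by
  intro t
  induction t with
  | nil =>
    intro rest best ptr cur i _ hcb _
    simp only [List.length_nil, Nat.add_zero, List.nil_append]
    rw [if_neg (by omega), if_neg (by omega)]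
  | cons e t ih =>
    intro rest best ptr cur i hall hcb hci
    have he : e.1 = e.2 := hall e (by simp)
    have hallt : ∀ xy ∈ t, xy.1 = xy.2 := fun xy hxy => hall xy (by simp [hxy])
    rw [List.cons_append, pvBRun, if_pos he]
    by_cases hb : best < cur + 1
    · rw [if_pos hb, ih rest (cur + 1) (i + 1 - (cur + 1)) (cur + 1) (i + 1) hallt le_rfl (by omega)]
      simp only [List.length_cons]
      apply pvBRun_congr <;> first | omega | (split_ifs <;> omega)
    · rw [if_neg hb, ih rest best ptr (cur + 1) (i + 1) hallt (by omega) (by omega)]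
      simp only [List.length_cons]
      apply pvBRun_congr <;> first | omega | (split_ifs <;> omega)

lemma pvBRun_skip (A B : List Char) (p best ptr : Nat) :
    pvBRun ((A.zip B).drop p) best ptr 0 p =
      pvBRun ((A.zip B).drop (p + pvRun A B p + 1))
        (if best < pvRun A B p then pvRun A B p else best)
        (if best < pvRun A B p then p else ptr) 0 (p + pvRun A B p + 1) := by
  set L := A.zip B with hL
  set l := L.drop p with hl
  set pred : Char × Char → Bool := fun c => c.1 == c.2 with hpred
  have hsplit : l.takeWhile pred ++ l.dropWhile pred = l := List.takeWhile_append_dropWhile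
  have hr : pvRun A B p = (l.takeWhile pred).length := rfl
  have hall : ∀ xy ∈ l.takeWhile pred, xy.1 = xy.2 := by
    intro xy hxy
    have := List.mem_takeWhile_imp hxy
    simpa [hpred] using this
  conv_lhs => rw [← hsplit]
  rw [pvBRun_run (l.takeWhile pred) (l.dropWhile pred) best ptr 0 p hall (by omega) (by omega)]
  simp only [Nat.zero_add]
  have hdd : L.drop (p + pvRun A B p + 1) = (l.dropWhile pred).drop 1 := by
    have h1 : p + pvRun A B p + 1 = p + (pvRun A B p + 1) := by omega
    rw [h1, ← List.drop_drop, ← hl]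
    conv_lhs => rw [← hsplit]
    rw [hr, List.drop_append]
    have h2 : (List.takeWhile pred l).length + 1 - (List.takeWhile pred l).length = 1 := by omega
    have h3 : List.drop ((List.takeWhile pred l).length + 1) (List.takeWhile pred l) = [] := by
      apply List.drop_eq_nil_of_le; omega
    rw [h2, h3, List.nil_append]
  rw [hdd, hr]
  cases hrest : l.dropWhile pred with
  | nil => simp [pvBRun]
  | cons e rest2 =>
    have he : e.1 ≠ e.2 := by
      have := List.head?_dropWhile_not pred l
      rw [hrest] at this
      simp [hpred] at this
      exact this
    rw [pvBRun, if_neg he]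
    simp only [List.drop_succ_cons, List.drop_zero, Nat.sub_zero]

-- the state A's outer loop would need to change its result at the last index: nothing matched yet
def pvBad (A B : List Char) (p best : Nat) : Prop :=
  best = 0 ∧ 2 ≤ A.length ∧ A.length ≤ B.length ∧
  A.getD (A.length - 1) 'a' = B.getD (A.length - 1) 'a' ∧
  ∀ i, p ≤ i → i < A.length - 1 → A.getD i 'a' ≠ B.getD i 'a'

lemma pvRun_zero_iff (A B : List Char) (p : Nat) (hp : p < min A.length B.length) :
    pvRun A B p = 0 ↔ A.getD p 'a' ≠ B.getD p 'a' := by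
  have ha : p < A.length := by omega
  have hb : p < B.length := by omega
  have hlen : p < (A.zip B).length := by simp [List.length_zip]; omega
  unfold pvRun
  rw [List.drop_eq_getElem_cons hlen, List.takeWhile_cons]
  have hget : (A.zip B)[p]'hlen = (A[p]'ha, B[p]'hb) := List.getElem_zip
  by_cases h : A[p]'ha = B[p]'hb
  · simp [hget, h, List.getD_eq_getElem, ha, hb]
  · simp [hget, h, ha, hb]

lemma pvOuter_eq (A B : List Char) : ∀ (k p best ptr : Nat), A.length - p ≤ k → 1 ≤ p →
    ¬ pvBad A B p best →
    pvOuterA A B ptr best p 1 =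
      PySem.List.slice A (some ((pvBRun ((A.zip B).drop p) best ptr 0 p).2 : Int))
        (some (((pvBRun ((A.zip B).drop p) best ptr 0 p).2 : Int)
          + ((pvBRun ((A.zip B).drop p) best ptr 0 p).1 : Int))) := by
  intro k
  induction k with
  | zero =>
    intro p best ptr hk hp hB
    rw [pvOuterA, dif_neg (by omega)]
    have hdrop : (A.zip B).drop p = [] := by
      apply List.drop_eq_nil_of_le
      have : (A.zip B).length = min A.length B.length := List.length_zip
      omega
    rw [hdrop]
    rfl
  | succ k ih =>
    intro p best ptr hk hp hB
    by_cases h : p + 1 < A.length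
    · rw [pvOuterA, dif_pos h]
      have hin : pvInnerA A B p 1 = pvRun A B p + 1 :=
        pvInner_spec A B p (by omega) 1 (by omega) (by omega)
      simp only [hin, Nat.add_sub_cancel]
      have hBad2 : ¬ pvBad A B (p + pvRun A B p + 1)
          (if best < pvRun A B p then (p, pvRun A B p) else (ptr, best)).2 := by
        intro hBad2
        apply hB
        obtain ⟨hb0, hn2, hnm, hlast, hmiss⟩ := hBad2
        have hbr0 : best = 0 ∧ pvRun A B p = 0 := by
          by_cases hbr : best < pvRun A B p
          · rw [if_pos hbr] at hb0; simp at hb0; omega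
          · rw [if_neg hbr] at hb0; simp at hb0; omega
        refine ⟨hbr0.1, hn2, hnm, hlast, ?_⟩
        intro i hpi hi
        by_cases hip : i = p
        · subst hip
          exact (pvRun_zero_iff A B i (by omega)).mp hbr0.2
        · exact hmiss i (by omega) hi
      rw [ih (p + pvRun A B p + 1)
        ((if best < pvRun A B p then (p, pvRun A B p) else (ptr, best)).2)
        ((if best < pvRun A B p then (p, pvRun A B p) else (ptr, best)).1)
        (by omega) (by omega) hBad2]
      rw [pvBRun_skip A B p best ptr]
      by_cases hbr : best < pvRun A B p
      · simp only [if_pos hbr]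
      · simp only [if_neg hbr]
    · rw [pvOuterA, dif_neg h]
      by_cases hM : (A.zip B).length ≤ p
      · rw [List.drop_eq_nil_of_le hM]
        rfl
      · have hzlen : (A.zip B).length = min A.length B.length := List.length_zip
        have hplen : p < (A.zip B).length := by omega
        have hpn : p = A.length - 1 := by omega
        have hnm : A.length ≤ B.length := by omega
        rw [List.drop_eq_getElem_cons hplen]
        have hdrop2 : (A.zip B).drop (p + 1) = [] := by
          apply List.drop_eq_nil_of_le; omega
        rw [hdrop2]
        have hget : (A.zip B)[p]'hplen = (A[p]'(by omega), B[p]'(by omega)) := List.getElem_zip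
        by_cases hx : A[p]'(by omega) = B[p]'(by omega)
        · by_cases hb0 : best < 0 + 1
          · exfalso
            apply hB
            refine ⟨by omega, by omega, hnm, ?_, ?_⟩
            · rw [List.getD_eq_getElem A 'a' (show A.length - 1 < A.length by omega),
                List.getD_eq_getElem B 'a' (show A.length - 1 < B.length by omega)]
              have hpeq : A.length - 1 = p := by omega
              simp only [hpeq]
              exact hx
            · intro i hpi hi; omega
          · rw [pvBRun, if_pos (by rw [hget]; exact hx), if_neg hb0, pvBRun]
        · rw [pvBRun, if_neg (by rw [hget]; exact hx), pvBRun]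

-- A's loop when every position before the last mismatches: the best stays (0, 0)
lemma pvOuter_allmiss (A B : List Char) (hnm : A.length ≤ B.length)
    (hmiss : ∀ i, i < A.length - 1 → A.getD i 'a' ≠ B.getD i 'a') :
    ∀ k p, 1 ≤ p → A.length - p ≤ k →
    pvOuterA A B 0 0 p 1 =
      PySem.List.slice A (some ((0 : Nat) : Int)) (some (((0 : Nat) : Int) + ((0 : Nat) : Int))) := by
  intro k
  induction k with
  | zero =>
    intro p hp hk
    rw [pvOuterA, dif_neg (by omega)]
  | succ k ih =>
    intro p hp hk
    by_cases h : p + 1 < A.length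
    · rw [pvOuterA, dif_pos h]
      have hin : pvInnerA A B p 1 = pvRun A B p + 1 :=
        pvInner_spec A B p (by omega) 1 (by omega) (by omega)
      have hr0 : pvRun A B p = 0 :=
        (pvRun_zero_iff A B p (by omega)).mpr (hmiss p (by omega))
      simp only [hin, hr0, Nat.add_sub_cancel, Nat.lt_irrefl, if_false]
      exact ih (p + 1) (by omega) (by omega)
    · rw [pvOuterA, dif_neg h]

-- B's loop on the same inputs: it reaches the matching last pair with best = 0 and takes it
lemma pvBRun_allmiss (A B : List Char) (hnm : A.length ≤ B.length) (hn2 : 2 ≤ A.length)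
    (hmiss : ∀ i, i < A.length - 1 → A.getD i 'a' ≠ B.getD i 'a')
    (hlast : A.getD (A.length - 1) 'a' = B.getD (A.length - 1) 'a') :
    ∀ k p, p ≤ A.length - 1 → (A.length - 1) - p ≤ k →
    pvBRun ((A.zip B).drop p) 0 0 0 p = (1, A.length - 1) := by
  have hzlen : (A.zip B).length = min A.length B.length := List.length_zip
  have hfin : ∀ q, q = A.length - 1 → pvBRun ((A.zip B).drop q) 0 0 0 q = (1, A.length - 1) := by
    intro q hq
    have hplen : q < (A.zip B).length := by omega
    rw [List.drop_eq_getElem_cons hplen]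
    have hdrop2 : (A.zip B).drop (q + 1) = [] := by
      apply List.drop_eq_nil_of_le; omega
    rw [hdrop2]
    have hget : (A.zip B)[q]'hplen = (A[q]'(by omega), B[q]'(by omega)) := List.getElem_zip
    have hx : A[q]'(by omega) = B[q]'(by omega) := by
      rw [← List.getD_eq_getElem A 'a' (show q < A.length by omega),
          ← List.getD_eq_getElem B 'a' (show q < B.length by omega)]
      rw [hq]; exact hlast
    rw [pvBRun, if_pos (by rw [hget]; exact hx), if_pos (by omega), pvBRun]
    have : q + 1 - (0 + 1) = A.length - 1 := by omega
    rw [this]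
  intro k
  induction k with
  | zero =>
    intro p hp hk
    exact hfin p (by omega)
  | succ k ih =>
    intro p hp hk
    by_cases hfinal : p = A.length - 1
    · exact hfin p hfinal
    · have hr0 : pvRun A B p = 0 :=
        (pvRun_zero_iff A B p (by omega)).mpr (hmiss p (by omega))
      have hskip := pvBRun_skip A B p 0 0
      rw [hr0] at hskip
      simp only [Nat.lt_irrefl, if_false, Nat.add_zero] at hskip
      rw [hskip]
      exact ih (p + 1) (by omega) (by omega)

-- ===== VERDICT (by name: the statement is the Claim_ definition above) =====
theorem anchorSubSeq_spec : Claim_unchanged_anchorSubSeq := by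
  unfold Claim_unchanged_anchorSubSeq Spec_anchorSubSeq
  intro a b _ hD
  unfold D_anchorSubSeq at hD
  unfold anchorSubSeq anchorSubSeq_alt
  set A := a.toList with hA
  set B := b.toList with hB
  have hfb := pvFoldl_eq_bRun (A.zip B) 0 0 0 0
  have h1 : ((A.zip B).foldl pvAltStep (0, 0, 0, 0)).1 = (pvBRun (A.zip B) 0 0 0 0).1 := by
    rw [← hfb]
  have h2 : ((A.zip B).foldl pvAltStep (0, 0, 0, 0)).2.1 = (pvBRun (A.zip B) 0 0 0 0).2 := by
    rw [← hfb]
  simp only [h1, h2]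
  by_cases hn : A.length = 0
  · rw [pvOuterA, dif_neg (by omega)]
    have hz : A.zip B = [] := by
      have : (A.zip B).length = min A.length B.length := List.length_zip
      cases hzz : A.zip B with
      | nil => rfl
      | cons x t => rw [hzz] at this; simp at this; omega
    rw [hz]
    rfl
  · rw [pvOuterA, dif_pos (by omega : 0 + 0 < A.length)]
    have hin : pvInnerA A B 0 0 = pvRun A B 0 + 1 :=
      pvInner_spec A B 0 (by omega) 0 (by omega) (by omega)
    simp only [hin, Nat.add_sub_cancel]
    have hBad1 : ¬ pvBad A B (0 + pvRun A B 0 + 1)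
        ((if (0 : Nat) < pvRun A B 0 then ((0 : Nat), pvRun A B 0) else ((0 : Nat), (0 : Nat))).2) := by
      intro hBad
      apply hD
      obtain ⟨hb0, hn2, hnm, hlast, hmiss⟩ := hBad
      have hr0 : pvRun A B 0 = 0 := by
        by_cases h0 : (0 : Nat) < pvRun A B 0
        · rw [if_pos h0] at hb0; simp at hb0; omega
        · omega
      refine ⟨hn2, hnm, hlast, ?_⟩
      intro i hi
      by_cases hi0 : i = 0
      · subst hi0
        exact (pvRun_zero_iff A B 0 (by omega)).mp hr0
      · exact hmiss i (by omega) hi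
    rw [pvOuter_eq A B A.length (0 + pvRun A B 0 + 1) _ _ (by omega) (by omega) hBad1]
    have hskip := pvBRun_skip A B 0 0 0
    rw [List.drop_zero] at hskip
    rw [hskip]
    by_cases h0 : (0 : Nat) < pvRun A B 0
    · simp only [if_pos h0]
    · simp only [if_neg h0]

theorem anchorSubSeq_changed : Claim_changed_anchorSubSeq := by
  unfold Claim_changed_anchorSubSeq
  refine ⟨by decide, by decide, ?_, ?_, by decide⟩
  · show anchorSubSeq "xy" "zy" = ""
    simp [anchorSubSeq, pvOuterA, pvInnerA, PySem.List.slice, PySem.List.clampIdx]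
  · show anchorSubSeq_alt "xy" "zy" = "y"
    decide

theorem anchorSubSeq_tight : Claim_exact_anchorSubSeq := by
  unfold Claim_exact_anchorSubSeq
  intro a b _ hD
  obtain ⟨hn2, hnm, hlast, hmiss⟩ := hD
  unfold anchorSubSeq anchorSubSeq_alt
  set A := a.toList with hA
  set B := b.toList with hB
  -- A's side returns the empty string
  have hAside : pvOuterA A B 0 0 0 0 = [] := by
    rw [pvOuterA, dif_pos (by omega : 0 + 0 < A.length)]
    have hin : pvInnerA A B 0 0 = pvRun A B 0 + 1 :=
      pvInner_spec A B 0 (by omega) 0 (by omega) (by omega)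
    have hr0 : pvRun A B 0 = 0 :=
      (pvRun_zero_iff A B 0 (by omega)).mpr (hmiss 0 (by omega))
    simp only [hin, hr0, Nat.add_sub_cancel, Nat.lt_irrefl, if_false]
    rw [pvOuter_allmiss A B hnm hmiss A.length 1 (by omega) (by omega)]
    rw [PySem.List.slice_natCast_add]
    simp
  -- B's side returns the last character
  have hBside := pvBRun_allmiss A B hnm hn2 hmiss hlast A.length 0 (by omega) (by omega)
  rw [List.drop_zero] at hBside
  have hfb := pvFoldl_eq_bRun (A.zip B) 0 0 0 0
  have h1 : ((A.zip B).foldl pvAltStep (0, 0, 0, 0)).1 = (pvBRun (A.zip B) 0 0 0 0).1 := by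
    rw [← hfb]
  have h2 : ((A.zip B).foldl pvAltStep (0, 0, 0, 0)).2.1 = (pvBRun (A.zip B) 0 0 0 0).2 := by
    rw [← hfb]
  simp only [hAside, h1, h2, hBside]
  -- the two strings have different lengths
  intro heq
  have htl := congrArg String.toList heq
  rw [String.toList_ofList, String.toList_ofList] at htl
  rw [PySem.List.slice_natCast_add] at htl
  have hdc : A.drop (A.length - 1) = A[A.length - 1]'(by omega) :: A.drop (A.length - 1 + 1) :=
    List.drop_eq_getElem_cons (by omega)
  rw [hdc] at htl
  simp at htl
  omega
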